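-- pv_equiv track=rewrite | github.com/deus-avertat/asana-gpt-job-management | functions/ui.py | _is_list_item
-- ===== SOURCE A (Python) =====
-- def _is_list_item(line: str) -> bool:
--     """Return ``True`` when *line* represents a Markdown list item."""
--
--     stripped = line.lstrip()
--     if not stripped:
--         return False
--     if stripped[0] in "-*+" and (len(stripped) == 1 or stripped[1].isspace()):
--         return True
--     if stripped[0].isdigit():
--         index = 0
--         length = len(stripped)
--         while index < length and stripped[index].isdigit():
--             index += 1
--         if index and index < length and stripped[index] in {".", ")"}:
--             index += 1
--             if index == length or stripped[index].isspace():
--                 return True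
--     return False
-- ===== SOURCE B (Python) =====
-- def _is_list_item(line: str) -> bool:
--     """Return ``True`` when *line* represents a Markdown list item."""
--     tokens = line.split(None, 1)
--     if not tokens:
--         return False
--     marker = tokens[0]
--     if marker in ('-', '*', '+'):
--         return True
--     return marker[-1] in '.)' and marker[:-1].isdigit()
-- ===== Notes on version B (the rewrite author's own statement) =====
-- stated objective: simpler
-- what changed: Instead of lstrip plus a manual index loop counting digits and two positional look-aheads, B takes the first whitespace-delimited token with split(None, 1) and classifies it: a bare bullet '-'/'*'/'+', or digits followed by '.' or ')'.
import Mathlib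
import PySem

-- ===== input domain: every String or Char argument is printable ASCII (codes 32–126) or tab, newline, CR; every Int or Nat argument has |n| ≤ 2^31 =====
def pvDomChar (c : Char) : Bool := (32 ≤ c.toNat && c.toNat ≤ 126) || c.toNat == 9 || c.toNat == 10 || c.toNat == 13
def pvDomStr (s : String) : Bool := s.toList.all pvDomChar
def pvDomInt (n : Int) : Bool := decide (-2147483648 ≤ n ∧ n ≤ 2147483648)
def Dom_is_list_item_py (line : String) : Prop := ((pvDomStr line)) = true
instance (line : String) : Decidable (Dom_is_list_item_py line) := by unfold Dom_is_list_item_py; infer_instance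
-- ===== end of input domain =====

-- B replaces A's manual lstrip/index/digit-count scan by split(None, 1): classify the first
-- whitespace-delimited token (a bare bullet, or digits followed by '.'/')'); objective: simpler.

-- ===== PORT A =====
-- A's `while index < length and stripped[index].isdigit(): index += 1` as the obvious recursion
def digitPrefixLen : List Char → Nat
  | [] => 0
  | c :: cs => if PySem.Chars.isdigit c then digitPrefixLen cs + 1 else 0

def is_list_item_py (line : String) : Bool :=
  match PySem.Chars.lstrip line.toList with
  | [] => false                                             -- if not stripped: return False
  | c0 :: rest =>                                           -- stripped = c0 :: rest
    -- stripped[0] in "-*+" and (len(stripped) == 1 or stripped[1].isspace())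
    if (c0 == '-' || c0 == '*' || c0 == '+') &&
        (match rest with | [] => true | c1 :: _ => PySem.Chars.isspace c1) then true
    else if PySem.Chars.isdigit c0 then                     -- stripped[0].isdigit()
      let index := digitPrefixLen (c0 :: rest)              -- the while loop over digits
      let length := (c0 :: rest).length
      if (!(index == 0)) && decide (index < length) &&
          (match (c0 :: rest)[index]? with                  -- stripped[index] in {".", ")"}
            | some ch => ch == '.' || ch == ')' | none => false) then
        ((index + 1 == length) ||                           -- index == length after index += 1
          (match (c0 :: rest)[index + 1]? with              -- or stripped[index].isspace()
            | some ch => PySem.Chars.isspace ch | none => false))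
      else false
    else false

-- ===== PORT B =====
def is_list_item_py_alt (line : String) : Bool :=
  match PySem.Chars.split₀Max line.toList 1 with            -- tokens = line.split(None, 1)
  | [] => false                                             -- if not tokens: return False
  | marker :: _ =>                                          -- marker = tokens[0]
    if marker == ['-'] || marker == ['*'] || marker == ['+'] then true
    else
      (match PySem.List.pyGet? marker (-1) with             -- marker[-1] in '.)'
        | some ch => ch == '.' || ch == ')' | none => false) &&
      PySem.Chars.strIsdigit (PySem.List.slice marker none (some (-1)))  -- marker[:-1].isdigit()

-- ===== PRECONDITION & SPEC =====
def Spec_is_list_item_py (line : String) (out : Bool) : Prop := out = is_list_item_py_alt line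
instance (line : String) (out : Bool) : Decidable (Spec_is_list_item_py line out) := by
  unfold Spec_is_list_item_py; infer_instance

-- ===== CLAIM (what is proved, stated in full; the proofs are below) =====
def Claim_equal_is_list_item_py : Prop :=
  ∀ (line : String), Dom_is_list_item_py line → Spec_is_list_item_py line (is_list_item_py line)

-- ===== LEMMAS AND PROOFS =====

theorem isdigit_not_isspace (c : Char) (h : PySem.Chars.isdigit c = true) :
    PySem.Chars.isspace c = false := by
  simp only [PySem.Chars.isdigit, Bool.and_eq_true, decide_eq_true_eq, Char.le_def,
    UInt32.le_iff_toNat_le] at h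
  simp only [PySem.Chars.isspace]
  have e0 : ('0':Char).val.toNat = 48 := by decide
  have e9 : ('9':Char).val.toNat = 57 := by decide
  have h1 : 48 ≤ c.toNat := by have := h.1; rw [e0] at this; exact this
  have h2 : c.toNat ≤ 57 := by have := h.2; rw [e9] at this; exact this
  norm_num
  omega

theorem dropWhile_head_false {p : Char → Bool} {cs : List Char} {c : Char} {rest : List Char}
    (h : List.dropWhile p cs = c :: rest) : p c = false := by
  induction cs with
  | nil => simp [List.dropWhile] at h
  | cons a t ih =>
    rw [List.dropWhile_cons] at h
    split at h
    · exact ih h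
    · cases h; simpa using ‹¬ p c = true›

theorem takeWhile_append_all {p : Char → Bool} {l1 l2 : List Char}
    (h : ∀ x ∈ l1, p x = true) :
    List.takeWhile p (l1 ++ l2) = l1 ++ List.takeWhile p l2 := by
  induction l1 with
  | nil => simp
  | cons a t ih =>
    simp [h a (by simp), ih fun x hx => h x (by simp [hx])]

theorem dpl_eq (cs : List Char) :
    digitPrefixLen cs = (cs.takeWhile PySem.Chars.isdigit).length := by
  induction cs with
  | nil => rfl
  | cons a t ih =>
    simp only [digitPrefixLen, List.takeWhile_cons]
    split <;> simp [ih]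

theorem split_go_succ (fuel m : Nat) (l : List Char) (acc : List (List Char)) :
    PySem.Chars.split₀Max.go (fuel + 1) m l acc =
      match l.dropWhile PySem.Chars.isspace with
      | [] => acc.reverse
      | l' =>
        if m = 0 then (l' :: acc).reverse
        else PySem.Chars.split₀Max.go fuel (m - 1)
               (l'.dropWhile (fun c => !PySem.Chars.isspace c))
               ((l'.takeWhile (fun c => !PySem.Chars.isspace c)) :: acc) := by
  rw [PySem.Chars.split₀Max.go]; rfl

theorem split_one_nil (cs : List Char) (h : cs.dropWhile PySem.Chars.isspace = []) :
    PySem.Chars.split₀Max cs 1 = [] := by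
  rw [PySem.Chars.split₀Max]
  norm_num
  rw [split_go_succ, h]
  rfl

theorem split_one_cons (cs : List Char) (c : Char) (rest : List Char)
    (h : cs.dropWhile PySem.Chars.isspace = c :: rest) :
    ∃ r, PySem.Chars.split₀Max cs 1 =
      ((c :: rest).takeWhile (fun x => !PySem.Chars.isspace x)) :: r := by
  have hne : cs ≠ [] := by
    intro hnil; rw [hnil] at h; simp [List.dropWhile] at h
  obtain ⟨k, hk⟩ : ∃ k, cs.length = k + 1 := by
    cases cs with
    | nil => exact absurd rfl hne
    | cons a t => exact ⟨t.length, rfl⟩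
  rw [PySem.Chars.split₀Max]
  norm_num
  rw [hk, split_go_succ, h]
  simp only [Nat.sub_self, if_neg (by omega : ¬ (1 = 0))]
  rw [split_go_succ]
  cases hq : ((c :: rest).dropWhile (fun x => !PySem.Chars.isspace x)).dropWhile
      PySem.Chars.isspace with
  | nil => exact ⟨[], by simp⟩
  | cons a t => exact ⟨[a :: t], by simp⟩

theorem punct_not_digit {ch : Char} (hd : PySem.Chars.isdigit ch = true) :
    (ch == '.' || ch == ')') = false := by
  simp only [Bool.or_eq_false_iff, beq_eq_false_iff_ne]
  refine ⟨fun h => ?_, fun h => ?_⟩ <;> (subst h; exact absurd hd (by decide))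

theorem punct_not_space {ch : Char} (hp : (ch == '.' || ch == ')') = true) :
    PySem.Chars.isspace ch = false := by
  rcases Bool.or_eq_true_iff.mp hp with h | h <;>
    (rw [beq_iff_eq.mp h]; decide)

theorem strIsdigit_mid_false {P : List Char} {p : Char} {l : List Char}
    (h : PySem.Chars.isdigit p = false) :
    PySem.Chars.strIsdigit (P ++ p :: l) = false := by
  simp [PySem.Chars.strIsdigit, h]

theorem lastcheck_digits_false {P : List Char}
    (hall : ∀ x ∈ P, PySem.Chars.isdigit x = true) :
    (match PySem.List.pyGet? P (-1) with
      | some ch => ch == '.' || ch == ')' | none => false) = false := by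
  rw [PySem.List.pyGet?_neg_one]
  cases hl : P.getLast? with
  | none => rfl
  | some ch =>
    have hmem : ch ∈ P := List.mem_of_getLast? hl
    exact punct_not_digit (hall ch hmem)

-- the body of B's port once the first token `m` is in hand
def altBody (m : List Char) : Bool :=
  if m == ['-'] || m == ['*'] || m == ['+'] then true
  else
    (match PySem.List.pyGet? m (-1) with
      | some ch => ch == '.' || ch == ')' | none => false) &&
    PySem.Chars.strIsdigit (PySem.List.slice m none (some (-1)))

theorem alt_eq_altBody (line : String) (m : List Char) (r : List (List Char))
    (hs : PySem.Chars.split₀Max line.toList 1 = m :: r) :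
    is_list_item_py_alt line = altBody m := by
  unfold is_list_item_py_alt altBody; rw [hs]

theorem altBody_two (c b : Char) (t : List Char) (hdc : PySem.Chars.isdigit c = false) :
    altBody (c :: b :: t) = false := by
  unfold altBody
  have hbe : ∀ x : Char, ((c :: b :: t) == [x]) = false := by
    intro x
    refine beq_eq_false_iff_ne.mpr fun h => ?_
    have := congrArg List.length h; simp at this
  rw [hbe, hbe, hbe]
  rw [PySem.List.slice_to_neg_one]
  have hdl : (c :: b :: t).dropLast = c :: (b :: t).dropLast := rfl
  rw [hdl]
  simp [PySem.Chars.strIsdigit, hdc]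

theorem altBody_single_nonbullet (c : Char)
    (hb : (c == '-' || c == '*' || c == '+') = false) :
    altBody [c] = false := by
  unfold altBody
  simp only [Bool.or_eq_false_iff, beq_eq_false_iff_ne] at hb
  have hbe : ∀ x : Char, c ≠ x → (([c] : List Char) == [x]) = false := fun x hx =>
    beq_eq_false_iff_ne.mpr fun h => hx (List.singleton_inj.mp h)
  rw [hbe _ hb.1.1, hbe _ hb.1.2, hbe _ hb.2]
  rw [PySem.List.slice_to_neg_one]
  simp [PySem.Chars.strIsdigit]

theorem altBody_digits_false (P : List Char)
    (hall : ∀ x ∈ P, PySem.Chars.isdigit x = true) :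
    altBody P = false := by
  unfold altBody
  have hbe : ∀ x : Char, PySem.Chars.isdigit x = false → (P == [x]) = false := by
    intro x hx
    refine beq_eq_false_iff_ne.mpr fun h => ?_
    have : x ∈ P := by rw [h]; simp
    rw [hall x this] at hx; cases hx
  rw [hbe _ (by decide), hbe _ (by decide), hbe _ (by decide)]
  simp only [Bool.or_self]
  rw [lastcheck_digits_false hall]
  rfl

theorem altBody_digits (P : List Char) (p : Char) (hne : P ≠ [])
    (hall : ∀ x ∈ P, PySem.Chars.isdigit x = true) :
    altBody (P ++ [p]) = (p == '.' || p == ')') := by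
  unfold altBody
  have hbe : ∀ x : Char, ((P ++ [p]) == [x]) = false := by
    intro x
    refine beq_eq_false_iff_ne.mpr fun h => ?_
    have := congrArg List.length h; simp at this
    exact hne this
  rw [hbe, hbe, hbe]
  simp only [Bool.or_self]
  rw [PySem.List.slice_to_neg_one, List.dropLast_concat,
    PySem.List.pyGet?_neg_one_append_singleton]
  have : PySem.Chars.strIsdigit P = true := by
    simp [PySem.Chars.strIsdigit, hne, List.all_eq_true.mpr hall,
      List.isEmpty_eq_false_iff]
  simp [this]

theorem altBody_mid (P : List Char) (p : Char) (l : List Char) (hl : l ≠ [])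
    (hpd : PySem.Chars.isdigit p = false) :
    altBody (P ++ p :: l) = false := by
  unfold altBody
  have hbe : ∀ x : Char, ((P ++ p :: l) == [x]) = false := by
    intro x
    refine beq_eq_false_iff_ne.mpr fun h => ?_
    have hlen : (P ++ p :: l).length = 1 := by rw [h]; rfl
    rw [List.length_append, List.length_cons] at hlen
    have : l.length = 0 := by omega
    exact hl (List.length_eq_zero_iff.mp this)
  rw [hbe, hbe, hbe]
  simp only [Bool.or_self]
  cases l with
  | nil => exact absurd rfl hl
  | cons y ys =>
    rw [PySem.List.slice_to_neg_one]
    have hdl : (P ++ p :: y :: ys).dropLast = P ++ p :: (y :: ys).dropLast := by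
      rw [List.dropLast_append_of_ne_nil (by simp)]; rfl
    rw [hdl, strIsdigit_mid_false hpd, Bool.and_false]
    simp

theorem dpl_PQ (P Q : List Char)
    (hall : ∀ x ∈ P, PySem.Chars.isdigit x = true)
    (hq : ∀ p l, Q = p :: l → PySem.Chars.isdigit p = false) :
    digitPrefixLen (P ++ Q) = P.length := by
  rw [dpl_eq, takeWhile_append_all hall]
  cases hQ : Q with
  | nil => simp
  | cons p l => simp [List.takeWhile_cons, hq p l hQ]

theorem main_eq (line : String) : is_list_item_py line = is_list_item_py_alt line := by
  cases hd : List.dropWhile PySem.Chars.isspace line.toList with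
  | nil =>
    have hB : is_list_item_py_alt line = false := by
      unfold is_list_item_py_alt; rw [split_one_nil _ hd]
    have hA : is_list_item_py line = false := by
      unfold is_list_item_py; simp [PySem.Chars.lstrip, hd]
    rw [hA, hB]
  | cons c rest =>
    obtain ⟨r, hs⟩ := split_one_cons _ _ _ hd
    have hcns : PySem.Chars.isspace c = false := dropWhile_head_false hd
    have hmk : (c :: rest).takeWhile (fun x => !PySem.Chars.isspace x)
        = c :: rest.takeWhile (fun x => !PySem.Chars.isspace x) := by
      simp [List.takeWhile_cons, hcns]
    rw [hmk] at hs
    rw [alt_eq_altBody line _ r hs]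
    have hlst : PySem.Chars.lstrip line.toList = c :: rest := by
      simp [PySem.Chars.lstrip, hd]
    unfold is_list_item_py
    simp only [hlst]
    by_cases hb : c = '-' ∨ c = '*' ∨ c = '+'
    · -- bullet marker character
      have hdc : PySem.Chars.isdigit c = false := by
        rcases hb with h | h | h <;> (subst h; decide)
      cases hr : rest with
      | nil =>
        simp only [List.takeWhile_nil]
        rcases hb with h | h | h <;> (subst h; simp [altBody])
      | cons c1 rest' =>
        by_cases hs1 : PySem.Chars.isspace c1 = true
        · have ht : (c1 :: rest').takeWhile (fun x => !PySem.Chars.isspace x) = [] := by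
            simp [List.takeWhile_cons, hs1]
          rw [ht]
          rcases hb with h | h | h <;> (subst h; simp [hs1, altBody])
        · have hs1' : PySem.Chars.isspace c1 = false := by simpa using hs1
          have ht : (c1 :: rest').takeWhile (fun x => !PySem.Chars.isspace x)
              = c1 :: rest'.takeWhile (fun x => !PySem.Chars.isspace x) := by
            simp [List.takeWhile_cons, hs1']
          rw [ht, altBody_two _ _ _ hdc]
          rcases hb with h | h | h <;> (subst h; simp [hs1', hdc])
    · -- not a bullet character
      push_neg at hb
      obtain ⟨hb1, hb2, hb3⟩ := hb
      have hbul : (c == '-' || c == '*' || c == '+') = false := by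
        simp [hb1, hb2, hb3]
      simp only [hbul, Bool.false_and, Bool.false_eq_true, if_false]
      by_cases hdg : PySem.Chars.isdigit c = true
      · -- digit-numbered item
        simp only [hdg, if_true]
        have hPQ : (c :: rest).takeWhile PySem.Chars.isdigit
            ++ (c :: rest).dropWhile PySem.Chars.isdigit = c :: rest :=
          List.takeWhile_append_dropWhile
        have hallP : ∀ x ∈ (c :: rest).takeWhile PySem.Chars.isdigit,
            PySem.Chars.isdigit x = true := fun x hx => List.mem_takeWhile_imp hx
        have hPne : (c :: rest).takeWhile PySem.Chars.isdigit ≠ [] := by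
          simp [List.takeWhile_cons, hdg]
        have hQh : ∀ p l, (c :: rest).dropWhile PySem.Chars.isdigit = p :: l →
            PySem.Chars.isdigit p = false := fun p l h => dropWhile_head_false h
        have hmk2 : c :: rest.takeWhile (fun x => !PySem.Chars.isspace x)
            = (c :: rest).takeWhile PySem.Chars.isdigit
              ++ ((c :: rest).dropWhile PySem.Chars.isdigit).takeWhile
                  (fun x => !PySem.Chars.isspace x) := by
          rw [← hmk]
          conv_lhs => rw [← hPQ]
          exact takeWhile_append_all fun x hx => by
            simp [isdigit_not_isspace x (hallP x hx)]
        rw [hmk2]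
        conv_lhs => rw [← hPQ]
        generalize hPdef : (c :: rest).takeWhile PySem.Chars.isdigit = P at *
        generalize hQdef : (c :: rest).dropWhile PySem.Chars.isdigit = Q at *
        clear hmk2 hmk hs hlst hd hcns hbul hb1 hb2 hb3 hdg hPdef hQdef
        rw [dpl_PQ P Q hallP hQh]
        have hlen : (P ++ Q).length = P.length + Q.length := List.length_append
        have hidx0 : (P.length == 0) = false := by
          simp [List.length_eq_zero_iff, hPne]
        rw [hidx0]
        have hget0 : (P ++ Q)[P.length]? = Q[0]? := by
          rw [List.getElem?_append_right (le_refl _)]; simp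
        have hget1 : (P ++ Q)[P.length + 1]? = Q[1]? := by
          rw [List.getElem?_append_right (Nat.le_add_right _ _)]; simp
        rw [hget0, hget1, hlen]
        cases hQ : Q with
        | nil =>
          simp only [List.takeWhile_nil, List.append_nil, List.length_nil]
          rw [altBody_digits_false P hallP]
          simp
        | cons p Q' =>
          have hpd : PySem.Chars.isdigit p = false := hQh p Q' hQ
          simp only [List.getElem?_cons_zero]
          have hlt : decide (P.length < P.length + (p :: Q').length) = true := by
            simp
          rw [hlt]
          by_cases hp2 : (p == '.' || p == ')') = true
          · -- digits then '.' or ')'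
            have hps : PySem.Chars.isspace p = false := punct_not_space hp2
            cases hQ' : Q' with
            | nil =>
              have ht : (p :: ([] : List Char)).takeWhile
                  (fun x => !PySem.Chars.isspace x) = [p] := by
                simp [List.takeWhile_cons, hps]
              rw [ht, altBody_digits P p hPne hallP]
              simp [hp2]
            | cons q Q'' =>
              by_cases hsq : PySem.Chars.isspace q = true
              · have ht : (p :: q :: Q'').takeWhile
                    (fun x => !PySem.Chars.isspace x) = [p] := by
                  simp [List.takeWhile_cons, hps, hsq]
                rw [ht, altBody_digits P p hPne hallP]
                simp [hp2, hsq]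
              · have hsq' : PySem.Chars.isspace q = false := by simpa using hsq
                have ht : (p :: q :: Q'').takeWhile
                    (fun x => !PySem.Chars.isspace x)
                    = p :: q :: Q''.takeWhile (fun x => !PySem.Chars.isspace x) := by
                  simp [List.takeWhile_cons, hps, hsq']
                rw [ht, altBody_mid P p _ (by simp) hpd]
                have hne2 : (P.length + 1 == P.length + (p :: q :: Q'').length) = false :=
                  beq_eq_false_iff_ne.mpr (by simp)
                simp [hp2, hsq', hne2]
          · -- digits then something else
            have hp2' : (p == '.' || p == ')') = false := by simpa using hp2
            simp only [List.getElem?_cons_zero, hp2', Bool.and_false,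
              Bool.false_eq_true, if_false]
            by_cases hsp : PySem.Chars.isspace p = true
            · have ht : (p :: Q').takeWhile (fun x => !PySem.Chars.isspace x) = [] := by
                simp [List.takeWhile_cons, hsp]
              rw [ht, List.append_nil, altBody_digits_false P hallP]
            · have hsp' : PySem.Chars.isspace p = false := by simpa using hsp
              have ht : (p :: Q').takeWhile (fun x => !PySem.Chars.isspace x)
                  = p :: Q'.takeWhile (fun x => !PySem.Chars.isspace x) := by
                simp [List.takeWhile_cons, hsp']
              rw [ht]
              cases hT : Q'.takeWhile (fun x => !PySem.Chars.isspace x) with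
              | nil => rw [altBody_digits P p hPne hallP, hp2']
              | cons y ys => rw [altBody_mid P p _ (by simp) hpd]
      · -- neither bullet nor digit
        have hdg' : PySem.Chars.isdigit c = false := by simpa using hdg
        simp only [hdg', Bool.false_eq_true, if_false]
        cases hT : rest.takeWhile (fun x => !PySem.Chars.isspace x) with
        | nil => rw [altBody_single_nonbullet c hbul]
        | cons y ys => rw [altBody_two _ _ _ hdg']

-- ===== VERDICT (by name: the statement is the Claim_ definition above) =====
theorem is_list_item_py_spec : Claim_equal_is_list_item_py := by
  intro line _
  unfold Spec_is_list_item_py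
  exact main_eq line
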